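-- pv_equiv track=rewrite | github.com/Roimartinezr/medousa | backend/whoare/scrap/dondominio.py | fix_esnic_dns_block
-- ===== SOURCE A (Python) =====
-- def fix_esnic_dns_block(text: str) -> str:
--     """
--     Normaliza el bloque WHOIS .es de 'Servidores DNS' eliminando la línea vacía
--     inmediatamente posterior y convirtiendo el resto en 'Servidores DNS: valor'.
--     """
--     lines = text.splitlines()
--     out = []
--     inside_dns_block = False
--     skip_next_blank = False
--
--     for line in lines:
--         stripped = line.strip()
--
--         # Detectar encabezado "Servidores DNS"
--         if stripped.lower() == "servidores dns":
--             inside_dns_block = True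
--             skip_next_blank = True   # <- ESTA ES LA CLAVE
--             continue
--
--         # Si estamos dentro del bloque DNS
--         if inside_dns_block:
--
--             # Quitar SOLO la primera línea vacía después del encabezado
--             if skip_next_blank:
--                 if stripped == "":
--                     skip_next_blank = False
--                     continue
--                 else:
--                     # No era vacía, procesarla normalmente
--                     skip_next_blank = False
--
--             # Fin del bloque: aparece una clave tipo X: Y
--             if ":" in stripped:
--                 inside_dns_block = False
--                 out.append(line)
--                 continue
--
--             # Línea DNS válida
--             if stripped != "":
--                 out.append(f"Servidores DNS: {stripped}")
--                 continue
--
--             # Otras líneas vacías dentro del bloque DNS se ignoran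
--             continue
--
--         # Caso general fuera del bloque
--         out.append(line)
--
--     return "\n".join(out)
-- ===== SOURCE B (Python) =====
-- def _skip_header_run(lines, i):
--     """Advance past consecutive 'Servidores DNS' header lines starting at i,
--     then past exactly one blank line if it immediately follows."""
--     n = len(lines)
--     while i < n and lines[i].strip().lower() == "servidores dns":
--         i += 1
--     if i < n and lines[i].strip() == "":
--         i += 1
--     return i
--
--
-- def fix_esnic_dns_block(text: str) -> str:
--     lines = text.splitlines()
--     n = len(lines)
--     out = []
--     i = 0
--     while i < n:
--         if lines[i].strip().lower() != "servidores dns":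
--             out.append(lines[i])
--             i += 1
--             continue
--         # header found: enter the DNS block (lookahead skips headers + one blank)
--         i = _skip_header_run(lines, i + 1)
--         while i < n:
--             s = lines[i].strip()
--             if s.lower() == "servidores dns":
--                 i = _skip_header_run(lines, i + 1)
--                 continue
--             if ":" in s:
--                 out.append(lines[i])
--                 i += 1
--                 break
--             if s:
--                 out.append("Servidores DNS: " + s)
--             i += 1
--     return "\n".join(out)
-- ===== Notes on version B (the rewrite author's own statement) =====
-- stated objective: alternative
-- what changed: Replaced A's single for-loop with inside/skip boolean flag state by an explicit block-structured scan: outside lines are copied, and on a header a lookahead helper skips the header run plus exactly one following blank, then an inner loop consumes the DNS block until a ':' line.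
import Mathlib
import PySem

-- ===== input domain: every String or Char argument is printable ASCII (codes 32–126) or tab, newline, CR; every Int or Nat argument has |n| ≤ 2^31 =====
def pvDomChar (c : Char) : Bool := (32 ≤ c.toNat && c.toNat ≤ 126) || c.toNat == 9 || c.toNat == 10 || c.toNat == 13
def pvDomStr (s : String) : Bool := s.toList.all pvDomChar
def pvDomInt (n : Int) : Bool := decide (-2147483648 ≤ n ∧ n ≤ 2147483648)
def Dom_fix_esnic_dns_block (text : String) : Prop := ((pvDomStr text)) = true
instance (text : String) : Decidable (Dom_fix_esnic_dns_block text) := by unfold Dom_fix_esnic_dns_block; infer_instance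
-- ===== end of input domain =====

-- B replaces A's inside/skip boolean flags by an explicit block-structured recursion with
-- lookahead (skip the header run, then one blank); same result, objective: alternative.

-- ===== PORT A =====
-- one step of A's for-loop; state = (out, inside_dns_block, skip_next_blank).
-- A's nested 'if skip_next_blank: if stripped == "": continue' is transcribed as the
-- flattened condition 'skip ∧ stripped = ""'; on every continuing path skip becomes false,
-- exactly as in A.
def fixStepA (st : List String × Bool × Bool) (line : String) : List String × Bool × Bool :=
  let stripped := PySem.Str.strip line
  if PySem.Str.lower stripped = "servidores dns" then (st.1, true, true)
  else if st.2.1 = true then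
    if st.2.2 = true ∧ stripped = "" then (st.1, true, false)
    else if PySem.Str.isIn ":" stripped then (st.1 ++ [line], false, false)
    else if stripped ≠ "" then (st.1 ++ [String.append "Servidores DNS: " stripped], true, false)
    else (st.1, true, false)
  else (st.1 ++ [line], st.2.1, st.2.2)

def fix_esnic_dns_block (text : String) : String :=
  PySem.Str.join "\n" ((PySem.Str.splitlines text).foldl fixStepA ([], false, false)).1

-- ===== PORT B =====
-- _skip_header_run: drop consecutive header lines, then exactly one blank line.
def skipHB : List String → List String
  | [] => []
  | l :: rest =>
    if PySem.Str.lower (PySem.Str.strip l) = "servidores dns" then skipHB rest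
    else if PySem.Str.strip l = "" then rest
    else l :: rest

theorem skipHB_length_le : ∀ xs : List String, (skipHB xs).length ≤ xs.length := by
  intro xs
  induction xs with
  | nil => simp [skipHB]
  | cons l rest ih =>
    simp only [skipHB]
    split_ifs with h1 h2 <;> simp <;> omega

mutual
def altOuter : List String → List String
  | [] => []
  | l :: rest =>
    if PySem.Str.lower (PySem.Str.strip l) = "servidores dns" then altBlock (skipHB rest)
    else l :: altOuter rest
termination_by xs => xs.length
decreasing_by all_goals (have h := skipHB_length_le rest; simp only [List.length_cons]; omega)
def altBlock : List String → List String
  | [] => []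
  | l :: rest =>
    if PySem.Str.lower (PySem.Str.strip l) = "servidores dns" then altBlock (skipHB rest)
    else if PySem.Str.isIn ":" (PySem.Str.strip l) then l :: altOuter rest
    else if PySem.Str.strip l ≠ "" then
      String.append "Servidores DNS: " (PySem.Str.strip l) :: altBlock rest
    else altBlock rest
termination_by xs => xs.length
decreasing_by all_goals (have h := skipHB_length_le rest; simp only [List.length_cons]; omega)
end

def fix_esnic_dns_block_alt (text : String) : String :=
  PySem.Str.join "\n" (altOuter (PySem.Str.splitlines text))

-- ===== PRECONDITION & SPEC =====
def Spec_fix_esnic_dns_block (text : String) (out : String) : Prop := out = fix_esnic_dns_block_alt text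
instance (text : String) (out : String) : Decidable (Spec_fix_esnic_dns_block text out) := by unfold Spec_fix_esnic_dns_block; infer_instance

-- ===== CLAIM (what is proved, stated in full; the proofs are below) =====
def Claim_equal_fix_esnic_dns_block : Prop := ∀ (text : String), Dom_fix_esnic_dns_block text → Spec_fix_esnic_dns_block text (fix_esnic_dns_block text)

-- ===== LEMMAS AND PROOFS =====

-- recursive characterisation of A's loop (the emitted lines, given the two flags)
def procA : List String → Bool → Bool → List String
  | [], _, _ => []
  | l :: rest, inside, skip =>
    if PySem.Str.lower (PySem.Str.strip l) = "servidores dns" then procA rest true true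
    else if inside = true then
      if skip = true ∧ PySem.Str.strip l = "" then procA rest true false
      else if PySem.Str.isIn ":" (PySem.Str.strip l) then l :: procA rest false false
      else if PySem.Str.strip l ≠ "" then
        String.append "Servidores DNS: " (PySem.Str.strip l) :: procA rest true false
      else procA rest true false
    else l :: procA rest false skip

theorem foldA_eq_procA :
    ∀ (xs : List String) (acc : List String) (inside skip : Bool),
      (xs.foldl fixStepA (acc, inside, skip)).1 = acc ++ procA xs inside skip := by
  intro xs
  induction xs with
  | nil => intro acc inside skip; simp [procA]
  | cons l rest ih =>
    intro acc inside skip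
    cases inside <;> cases skip <;>
      (simp only [List.foldl_cons, fixStepA, procA]; split_ifs <;> simp_all [ih])

theorem procA_eq_alt :
    ∀ xs : List String,
      procA xs false false = altOuter xs ∧ procA xs true false = altBlock xs ∧
      procA xs true true = altBlock (skipHB xs) := by
  intro xs
  induction xs with
  | nil => simp [procA, altOuter, altBlock, skipHB]
  | cons l rest ih =>
    obtain ⟨h1, h2, h3⟩ := ih
    refine ⟨?_, ?_, ?_⟩
    · simp only [procA, altOuter]
      split_ifs <;> simp_all
    · simp only [procA, altBlock]
      split_ifs <;> simp_all
    · simp only [procA, skipHB]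
      split_ifs <;> simp_all [altBlock]

-- ===== VERDICT (by name: the statement is the Claim_ definition above) =====
theorem fix_esnic_dns_block_spec : Claim_equal_fix_esnic_dns_block := by
  intro text _
  unfold Spec_fix_esnic_dns_block fix_esnic_dns_block fix_esnic_dns_block_alt
  rw [foldA_eq_procA, (procA_eq_alt _).1]
  simp
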